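-- pv_equiv track=rewrite | github.com/dmanh204/des | des.py | hoanvi
-- ===== SOURCE A (Python) =====
-- def hoanvi(dauvao, matran):
--       ketqua =[]
--       for i in range(len(matran)):
--             if (i % 8 )== 0:        # neu chia het cho 8 tuc la bat dau 1 so 8 bit moi
--                   ketqua.append(0x00)     # khoi tao so 8 bit de chua ket qua
--             a = matran[i] - 1       # a luu gia tri cua phan tu trong ma tran hoan vi
--             nhanbit = 0x80 >> (a%8) # tao gia tri de don bit
--             nhanbit = nhanbit & (dauvao[a//8])
--             if ((i%8) - (a%8)) > 0:
--                   nhanbit = nhanbit >> ((i%8) - (a%8))    # dua bit ve vi tri sau hoan vi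
--             elif ((i%8) - (a%8)) < 0:
--                   nhanbit = nhanbit << ((a%8) - (i%8))
--             ketqua[i//8] = ketqua[i//8] | nhanbit       # day bit vao ket qua
--       return ketqua
-- ===== SOURCE B (Python) =====
-- def hoanvi(dauvao, matran):
--     # unpack -> select -> repack pipeline over an explicit MSB-first bit list
--     bits = [(byte >> (7 - b)) & 1 for byte in dauvao for b in range(8)]
--     return _pack([bits[m - 1] for m in matran])
--
-- def _pack(sel):
--     if not sel:
--         return []
--     byte = 0
--     for k, bit in enumerate(sel[:8]):
--         byte |= bit << (7 - k)
--     return [byte] + _pack(sel[8:])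
-- ===== Notes on version B (the rewrite author's own statement) =====
-- stated objective: simpler
-- what changed: Replaces A's in-place mask/shift/merge arithmetic over an indexed loop with a staged unpack-to-bit-list, permute-by-table, repack-8-bits-per-byte pipeline (recursive chunking on the selected bit list).
import Mathlib
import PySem

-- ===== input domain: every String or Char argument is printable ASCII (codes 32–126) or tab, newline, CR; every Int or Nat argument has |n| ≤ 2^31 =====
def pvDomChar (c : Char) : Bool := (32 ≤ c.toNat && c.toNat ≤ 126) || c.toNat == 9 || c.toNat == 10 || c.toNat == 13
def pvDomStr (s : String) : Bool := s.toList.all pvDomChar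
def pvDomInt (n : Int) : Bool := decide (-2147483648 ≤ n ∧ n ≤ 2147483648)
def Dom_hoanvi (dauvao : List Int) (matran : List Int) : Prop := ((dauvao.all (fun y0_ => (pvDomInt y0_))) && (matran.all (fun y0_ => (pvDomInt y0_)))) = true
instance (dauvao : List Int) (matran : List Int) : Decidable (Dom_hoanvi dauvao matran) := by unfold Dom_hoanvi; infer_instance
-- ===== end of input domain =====

-- B replaces A's in-place mask/shift/merge arithmetic with a staged unpack→permute→repack
-- pipeline over an explicit bit list (objective: simpler); same return value on all of Pre_.

-- ===== PORT A =====
def hoanvi (dauvao : List Int) (matran : List Int) : List Int :=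
  (PySem.List.pyRange 0 (matran.length : Int)).foldl (fun ketqua i =>
    let ketqua := if PySem.Int.mod i 8 = 0 then ketqua ++ [(0 : Int)] else ketqua
    let a := PySem.List.pyGetD matran i 0 - 1
    let nhanbit := (128 : Int) >>> (PySem.Int.mod a 8).toNat
    let nhanbit := PySem.Int.band nhanbit (PySem.List.pyGetD dauvao (PySem.Int.floordiv a 8) 0)
    let nhanbit :=
      if PySem.Int.mod i 8 - PySem.Int.mod a 8 > 0 then
        nhanbit >>> (PySem.Int.mod i 8 - PySem.Int.mod a 8).toNat
      else if PySem.Int.mod i 8 - PySem.Int.mod a 8 < 0 then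
        nhanbit <<< (PySem.Int.mod a 8 - PySem.Int.mod i 8).toNat
      else nhanbit
    ketqua.set (PySem.Int.floordiv i 8).toNat
      (PySem.Int.bor (PySem.List.pyGetD ketqua (PySem.Int.floordiv i 8) 0) nhanbit)) []

-- ===== PORT B =====
-- port of Source B's helper _pack: pack the selected bit list eight bits per byte, recursively
def pvPackB (sel : List Int) : List Int :=
  match sel with
  | [] => []
  | x :: rest =>
    ((PySem.List.enumerate ((x :: rest).take 8)).foldl
        (fun (byte : Int) (kb : Int × Int) =>
          PySem.Int.bor byte (kb.2 <<< ((7 : Int) - kb.1).toNat)) 0)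
      :: pvPackB ((x :: rest).drop 8)
termination_by sel.length
decreasing_by simp only [List.length_drop, List.length_cons]; omega

def hoanvi_alt (dauvao : List Int) (matran : List Int) : List Int :=
  let bits := dauvao.flatMap (fun (byte : Int) =>
    (PySem.List.pyRange 0 8).map (fun (b : Int) => PySem.Int.band (byte >>> ((7 : Int) - b).toNat) 1))
  pvPackB (matran.map (fun m => PySem.List.pyGetD bits (m - 1) 0))

-- ===== PRECONDITION & SPEC =====
-- Pre_ excludes exactly the inputs where A raises IndexError (a table entry whose
-- bit index matran[i]-1 falls outside Python's valid index range for the 8*len(dauvao)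
-- bits of dauvao); B raises there too.
def Pre_hoanvi (dauvao : List Int) (matran : List Int) : Prop :=
  ∀ m ∈ matran, -(8 * (dauvao.length : Int)) ≤ m - 1 ∧ m - 1 < 8 * (dauvao.length : Int)
instance (dauvao : List Int) (matran : List Int) : Decidable (Pre_hoanvi dauvao matran) := by
  unfold Pre_hoanvi; infer_instance

def pvWitness_hoanvi : List Int × List Int := ([85, 170], [2, 16, 9, 0, 1, 8, 3, 5, 16])

def Spec_hoanvi (dauvao : List Int) (matran : List Int) (out : List Int) : Prop :=
  out = hoanvi_alt dauvao matran
instance (dauvao : List Int) (matran : List Int) (out : List Int) :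
    Decidable (Spec_hoanvi dauvao matran out) := by unfold Spec_hoanvi; infer_instance

-- ===== CLAIM (what is proved, stated in full; the proofs are below) =====
def Claim_equal_hoanvi : Prop := ∀ (dauvao : List Int) (matran : List Int),
  Dom_hoanvi dauvao matran → Pre_hoanvi dauvao matran →
  Spec_hoanvi dauvao matran (hoanvi dauvao matran)

-- ===== LEMMAS AND PROOFS =====

-- proof-side names for B's two stages
def pvBits (dauvao : List Int) : List Int :=
  dauvao.flatMap (fun (byte : Int) =>
    (PySem.List.pyRange 0 8).map (fun (b : Int) => PySem.Int.band (byte >>> ((7 : Int) - b).toNat) 1))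

def pvSel (dauvao : List Int) (m : Int) : Int :=
  PySem.List.pyGetD (pvBits dauvao) (m - 1) 0

-- proof-side name for the selected-and-shifted bit A merges at output position i
def pvContrib (dauvao : List Int) (m i : Int) : Int :=
  let a := m - 1
  let nhanbit := (128 : Int) >>> (PySem.Int.mod a 8).toNat
  let nhanbit := PySem.Int.band nhanbit (PySem.List.pyGetD dauvao (PySem.Int.floordiv a 8) 0)
  if PySem.Int.mod i 8 - PySem.Int.mod a 8 > 0 then
    nhanbit >>> (PySem.Int.mod i 8 - PySem.Int.mod a 8).toNat
  else if PySem.Int.mod i 8 - PySem.Int.mod a 8 < 0 then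
    nhanbit <<< (PySem.Int.mod a 8 - PySem.Int.mod i 8).toNat
  else nhanbit

-- proof-side name for A's loop body, with matran[i] passed in as m
def pvStep (dauvao : List Int) (ketqua : List Int) (m i : Int) : List Int :=
  let ketqua := if PySem.Int.mod i 8 = 0 then ketqua ++ [(0 : Int)] else ketqua
  ketqua.set (PySem.Int.floordiv i 8).toNat
    (PySem.Int.bor (PySem.List.pyGetD ketqua (PySem.Int.floordiv i 8) 0) (pvContrib dauvao m i))

theorem pvModCast2 (m : Nat) : PySem.Int.mod (m : Int) 2 = ((m % 2 : Nat) : Int) := by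
  exact_mod_cast PySem.Int.mod_natCast m 2

theorem pvShiftR_ofNat (t k : Nat) : ((t : Int) >>> k) = ((t >>> k : Nat) : Int) := rfl

theorem pvBand_two_pow (k : Nat) (y : Int) :
    PySem.Int.band (2 ^ k) y = PySem.Int.mod (y >>> k) 2 * 2 ^ k := by
  have h2k : ((2:Int)^k).toNat = 2^k := by
    have : ((2:Int)^k) = ((2^k : Nat) : Int) := by push_cast; ring
    rw [this, Int.toNat_natCast]
  cases y with
  | ofNat t =>
    have hy : (Int.ofNat t) = (t : Int) := rfl
    rw [hy, pvShiftR_ofNat, pvModCast2]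
    simp only [PySem.Int.band]
    rw [if_pos (by positivity), if_pos (by exact_mod_cast Nat.zero_le t), h2k, Int.toNat_natCast,
      Nat.two_pow_and, Nat.toNat_testBit, Nat.shiftRight_eq_div_pow]
    push_cast; ring
  | negSucc t =>
    have hneg : (Int.negSucc t) >>> k = Int.negSucc (t >>> k) := rfl
    rw [hneg]
    have hns : ¬ (0 ≤ Int.negSucc t) := by omega
    simp only [PySem.Int.band]
    rw [if_pos (by positivity), if_neg hns, h2k]
    have ht : (-(Int.negSucc t) - 1).toNat = t := by omega
    rw [ht, Nat.two_pow_and, Nat.toNat_testBit]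
    have hm : PySem.Int.mod (Int.negSucc (t >>> k)) 2 = 1 - ((t >>> k) : Int) % 2 := by
      rw [PySem.Int.mod_eq_emod_of_pos (by norm_num)]; omega
    rw [hm, Nat.shiftRight_eq_div_pow]
    have hle : (t / 2^k % 2) * 2^k ≤ 2^k := by
      have : t / 2^k % 2 ≤ 1 := by omega
      calc (t / 2^k % 2) * 2^k ≤ 1 * 2^k := Nat.mul_le_mul_right _ this
        _ = 2^k := by ring
    have hle' : 2^k * (t / 2^k % 2) ≤ 2^k := by rw [Nat.mul_comm]; exact hle
    rw [Nat.cast_sub hle', Nat.cast_mul]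
    have : ((t / 2 ^ k % 2 : Nat) : Int) = (t:Int) / 2^k % 2 := by push_cast; rfl
    rw [this]; push_cast; ring

theorem pvPyGetD_neg {α : Type} (xs : List α) (i : Int) (d : α) (hneg : i < 0)
    (hge : -(xs.length : Int) ≤ i) :
    PySem.List.pyGetD xs i d = xs.getD (xs.length - (-i).toNat) d := by
  unfold PySem.List.pyGetD PySem.List.pyGet? PySem.List.pyIdx?
  rw [if_neg (by omega), if_pos (by omega)]
  simp [List.getD_eq_getElem?_getD]

theorem pvBits_length (dauvao : List Int) : (pvBits dauvao).length = 8 * dauvao.length := by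
  induction dauvao with
  | nil => simp [pvBits]
  | cons x xs ih =>
    have hrange : PySem.List.pyRange 0 8 = [0,1,2,3,4,5,6,7] := by decide
    simp only [pvBits, List.flatMap_cons, List.length_append, List.length_map, hrange] at *
    simp at *
    omega

theorem pvBits_getD (dauvao : List Int) (t : Nat) (ht : t < 8 * dauvao.length) :
    (pvBits dauvao).getD t 0 =
      PySem.Int.band ((dauvao.getD (t / 8) 0) >>> (7 - t % 8)) 1 := by
  induction dauvao generalizing t with
  | nil => simp at ht
  | cons x xs ih =>
    have hrange : PySem.List.pyRange 0 8 = [0,1,2,3,4,5,6,7] := by decide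
    have hblk : pvBits (x :: xs) =
        [PySem.Int.band (x >>> (7:Nat)) 1, PySem.Int.band (x >>> (6:Nat)) 1,
         PySem.Int.band (x >>> (5:Nat)) 1, PySem.Int.band (x >>> (4:Nat)) 1,
         PySem.Int.band (x >>> (3:Nat)) 1, PySem.Int.band (x >>> (2:Nat)) 1,
         PySem.Int.band (x >>> (1:Nat)) 1, PySem.Int.band (x >>> (0:Nat)) 1] ++ pvBits xs := by
      simp only [pvBits, List.flatMap_cons, hrange]
      norm_num
      exact ⟨rfl, rfl, rfl, rfl, rfl, rfl⟩
    rw [hblk]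
    by_cases h8 : t < 8
    · rw [List.getD_append _ _ _ t (by simp; omega)]
      have ht8 : t % 8 = t := by omega
      have ht0 : t / 8 = 0 := by omega
      rw [ht8, ht0]
      interval_cases t <;> rfl
    · rw [List.getD_append_right _ _ _ t (by simp; omega)]
      have ih' := ih (t - 8) (by simp at ht; omega)
      simp only [List.length_cons, List.length_nil] at *
      rw [ih']
      have hdiv : t / 8 = (t - 8) / 8 + 1 := by omega
      have hmod : (t - 8) % 8 = t % 8 := by omega
      rw [hdiv, hmod, List.getD_cons_succ]

theorem pvSel_eq (d : List Int) (m : Int) (h1 : -(8 * (d.length : Int)) ≤ m - 1)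
    (h2 : m - 1 < 8 * (d.length : Int)) :
    pvSel d m = PySem.Int.band
      ((PySem.List.pyGetD d (PySem.Int.floordiv (m - 1) 8) 0) >>>
        (7 - (PySem.Int.mod (m - 1) 8).toNat)) 1 := by
  unfold pvSel
  by_cases hpos : 0 ≤ m - 1
  · obtain ⟨t, hta⟩ : ∃ t : Nat, m - 1 = (t : Int) := ⟨(m - 1).toNat, by omega⟩
    have ht : t < 8 * d.length := by omega
    rw [hta, PySem.List.pyGetD_natCast, List.getD_eq_getElem?_getD]
    rw [← List.getD_eq_getElem?_getD, pvBits_getD d t ht]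
    have hf : PySem.Int.floordiv (t : Int) 8 = ((t / 8 : Nat) : Int) := by
      exact_mod_cast PySem.Int.floordiv_natCast t 8
    have hm8 : PySem.Int.mod (t : Int) 8 = ((t % 8 : Nat) : Int) := by
      exact_mod_cast PySem.Int.mod_natCast t 8
    rw [hf, hm8, PySem.List.pyGetD_natCast, Int.toNat_natCast]
  · have hneg : m - 1 < 0 := by omega
    have hge : -(((pvBits d).length : Int)) ≤ m - 1 := by rw [pvBits_length]; push_cast; omega
    rw [pvPyGetD_neg _ _ _ hneg hge, pvBits_length]
    have ht : 8 * d.length - (-(m - 1)).toNat < 8 * d.length := by omega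
    rw [pvBits_getD d _ ht]
    have hfr := PySem.Int.floordiv_mul_add_mod (m - 1) 8
    have hr0 : 0 ≤ PySem.Int.mod (m - 1) 8 := PySem.Int.mod_nonneg _ (by norm_num)
    have hr8 : PySem.Int.mod (m - 1) 8 < 8 := PySem.Int.mod_lt _ (by norm_num)
    have hfneg : PySem.Int.floordiv (m - 1) 8 < 0 := by omega
    have hfge : -((d.length : Int)) ≤ PySem.Int.floordiv (m - 1) 8 := by omega
    rw [pvPyGetD_neg d _ 0 hfneg (by omega)]
    have h1 : d.length - (-(PySem.Int.floordiv (m - 1) 8)).toNat =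
        (8 * d.length - (-(m - 1)).toNat) / 8 := by omega
    have h2 : (PySem.Int.mod (m - 1) 8).toNat = (8 * d.length - (-(m - 1)).toNat) % 8 := by
      omega
    rw [h1, h2]

theorem pvContrib_eq (d : List Int) (m : Int) (h1 : -(8 * (d.length : Int)) ≤ m - 1)
    (h2 : m - 1 < 8 * (d.length : Int)) (qn : Nat) (hq : qn < 8) (i : Int)
    (hi : PySem.Int.mod i 8 = (qn : Int)) :
    pvContrib d m i = pvSel d m <<< (7 - qn) := by
  have hp0 : 0 ≤ PySem.Int.mod (m - 1) 8 := PySem.Int.mod_nonneg _ (by norm_num)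
  have hp8 : PySem.Int.mod (m - 1) 8 < 8 := PySem.Int.mod_lt _ (by norm_num)
  obtain ⟨pn, hpn, hpn8⟩ : ∃ pn : Nat, PySem.Int.mod (m - 1) 8 = (pn : Int) ∧ pn < 8 :=
    ⟨(PySem.Int.mod (m - 1) 8).toNat, by omega, by omega⟩
  have h128 : (128 : Int) >>> pn = 2 ^ (7 - pn) := by interval_cases pn <;> rfl
  have hselv : pvSel d m =
      PySem.Int.mod ((PySem.List.pyGetD d (PySem.Int.floordiv (m - 1) 8) 0) >>> (7 - pn)) 2 := by
    rw [pvSel_eq d m h1 h2, PySem.Int.band_one, hpn, Int.toNat_natCast]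
  have hband := pvBand_two_pow (7 - pn) (PySem.List.pyGetD d (PySem.Int.floordiv (m - 1) 8) 0)
  have hb01 : pvSel d m = 0 ∨ pvSel d m = 1 := by
    rw [hselv]
    have := PySem.Int.mod_nonneg ((PySem.List.pyGetD d (PySem.Int.floordiv (m - 1) 8) 0) >>> (7 - pn)) (by norm_num : (0:Int) < 2)
    have := PySem.Int.mod_lt ((PySem.List.pyGetD d (PySem.Int.floordiv (m - 1) 8) 0) >>> (7 - pn)) (by norm_num : (0:Int) < 2)
    omega
  unfold pvContrib
  simp only [hi, hpn, Int.toNat_natCast, h128, hband, ← hselv]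
  rcases hb01 with h | h <;> rw [h]
  · simp only [zero_mul]
    split_ifs <;> simp [Int.zero_shiftRight, Int.zero_shiftLeft]
  · simp only [one_mul]
    interval_cases pn <;> interval_cases qn <;> decide

theorem pvRangeFold {β : Type} (ms : List Int) (g : β → Int → Int → β) (init : β) :
    (List.range ms.length).foldl
        (fun (k : β) (i : Nat) => g k (PySem.List.pyGetD ms (i : Int) 0) (i : Int)) init
      = (ms.zipIdx).foldl (fun k p => g k p.1 (p.2 : Int)) init := by
  induction ms using List.reverseRecOn generalizing init with
  | nil => simp
  | append_singleton ms x ih =>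
    have hlen : (ms ++ [x]).length = ms.length + 1 := by simp
    rw [hlen, List.range_succ, List.foldl_append, List.zipIdx_append, List.foldl_append]
    have hpre : (List.range ms.length).foldl
        (fun (k : β) (i : Nat) => g k (PySem.List.pyGetD (ms ++ [x]) (i : Int) 0) (i : Int)) init
        = (List.range ms.length).foldl
        (fun (k : β) (i : Nat) => g k (PySem.List.pyGetD ms (i : Int) 0) (i : Int)) init := by
      apply PySem.List.foldl_congr_mem
      intro acc i hi
      have hilt : i < ms.length := List.mem_range.mp hi
      rw [PySem.List.pyGetD_natCast, PySem.List.pyGetD_natCast,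
        List.getD_append _ _ _ i hilt]
    rw [hpre, ih]
    simp only [List.foldl_cons, List.foldl_nil, List.zipIdx_cons, List.zipIdx_nil,
      Nat.zero_add]
    rw [PySem.List.pyGetD_natCast, List.getD_append_right _ _ _ _ le_rfl, Nat.sub_self,
      List.getD_cons_zero]

theorem pvL1 (d ms : List Int) :
    hoanvi d ms = (ms.zipIdx).foldl (fun k p => pvStep d k p.1 (p.2 : Int)) [] := by
  unfold hoanvi
  rw [PySem.List.pyRange_zero_natCast, List.foldl_map]
  exact pvRangeFold ms (fun k m i => pvStep d k m i) []

theorem pvEnumCons (x : Int) (t : List Int) (s : Int) :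
    PySem.List.enumerate (x :: t) s = (s, x) :: PySem.List.enumerate t (s + 1) := by
  simp [PySem.List.enumerate]

theorem pvStepEq (d : List Int) (m : Int)
    (hb : -(8 * (d.length : Int)) ≤ m - 1 ∧ m - 1 < 8 * (d.length : Int))
    (j r : Nat) (hr1 : 1 ≤ r) (hr : r < 8) (done : List Int) (b : Int)
    (hdone : done.length = j) :
    pvStep d (done ++ [b]) m ((8 * j + r : Nat) : Int) =
      done ++ [PySem.Int.bor b (pvSel d m <<< (7 - r))] := by
  have hmod : PySem.Int.mod ((8 * j + r : Nat) : Int) 8 = ((r : Nat) : Int) := by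
    have h := PySem.Int.mod_natCast (8 * j + r) 8
    have h2 : (8 * j + r) % 8 = r := by omega
    rw [h2] at h; exact_mod_cast h
  have hfd : PySem.Int.floordiv ((8 * j + r : Nat) : Int) 8 = ((j : Nat) : Int) := by
    have h := PySem.Int.floordiv_natCast (8 * j + r) 8
    have h2 : (8 * j + r) / 8 = j := by omega
    rw [h2] at h; exact_mod_cast h
  simp only [pvStep, hmod, hfd, Int.toNat_natCast]
  rw [if_neg (show ¬((r : Nat) : Int) = 0 by exact_mod_cast (by omega : ¬ r = 0))]
  rw [pvContrib_eq d m hb.1 hb.2 r (by omega) _ hmod]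
  rw [PySem.List.pyGetD_natCast, List.set_append, if_neg (by omega : ¬ j < done.length)]
  rw [List.getD_append_right _ _ _ _ (by omega)]
  simp [hdone]

theorem pvInner (d : List Int) (c : List Int) :
    ∀ (r : Nat), 1 ≤ r → r + c.length ≤ 8 →
    (∀ m ∈ c, -(8 * (d.length : Int)) ≤ m - 1 ∧ m - 1 < 8 * (d.length : Int)) →
    ∀ (j : Nat) (done : List Int) (b : Int), done.length = j →
    (c.zipIdx (8 * j + r)).foldl (fun k p => pvStep d k p.1 (p.2 : Int)) (done ++ [b]) =
      done ++ [(PySem.List.enumerate (c.map (pvSel d)) (r : Int)).foldl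
        (fun (byte : Int) (kb : Int × Int) =>
          PySem.Int.bor byte (kb.2 <<< ((7 : Int) - kb.1).toNat)) b] := by
  induction c with
  | nil =>
    intro r hr hr8 hbnd j done b hdone
    simp
  | cons m c' ih =>
    intro r hr hr8 hbnd j done b hdone
    rw [List.zipIdx_cons, List.foldl_cons]
    have hstep := pvStepEq d m (hbnd m (List.mem_cons_self)) j r hr
      (by simp at hr8; omega) done b hdone
    rw [hstep]
    have hoff : 8 * j + r + 1 = 8 * j + (r + 1) := by omega
    rw [hoff, ih (r + 1) (by omega) (by simp at hr8 ⊢; omega)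
      (fun x hx => hbnd x (List.mem_cons_of_mem _ hx)) j done
      (PySem.Int.bor b (pvSel d m <<< (7 - r))) hdone]
    rw [List.map_cons, pvEnumCons, List.foldl_cons]
    have h7 : ((7 : Int) - (r : Int)).toNat = 7 - r := by omega
    have hr1 : ((r : Int) + 1) = ((r + 1 : Nat) : Int) := by push_cast; ring
    rw [h7, hr1]

theorem pvChunk (d : List Int) (c : List Int) (hne : c ≠ []) (hlen : c.length ≤ 8)
    (hb : ∀ m ∈ c, -(8 * (d.length : Int)) ≤ m - 1 ∧ m - 1 < 8 * (d.length : Int))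
    (j : Nat) (done : List Int) (hdone : done.length = j) :
    (c.zipIdx (8 * j)).foldl (fun k p => pvStep d k p.1 (p.2 : Int)) done =
      done ++ [(PySem.List.enumerate (c.map (pvSel d)) 0).foldl
        (fun (byte : Int) (kb : Int × Int) =>
          PySem.Int.bor byte (kb.2 <<< ((7 : Int) - kb.1).toNat)) 0] := by
  cases c with
  | nil => exact absurd rfl hne
  | cons m0 c' =>
    rw [List.zipIdx_cons, List.foldl_cons]
    have hmod : PySem.Int.mod ((8 * j : Nat) : Int) 8 = ((0 : Nat) : Int) := by
      have h := PySem.Int.mod_natCast (8 * j) 8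
      have h2 : (8 * j) % 8 = 0 := by omega
      rw [h2] at h; exact_mod_cast h
    have hfd : PySem.Int.floordiv ((8 * j : Nat) : Int) 8 = ((j : Nat) : Int) := by
      have h := PySem.Int.floordiv_natCast (8 * j) 8
      have h2 : (8 * j) / 8 = j := by omega
      rw [h2] at h; exact_mod_cast h
    have hhead : pvStep d done m0 ((8 * j : Nat) : Int) =
        done ++ [PySem.Int.bor 0 (pvSel d m0 <<< (7 : Nat))] := by
      simp only [pvStep, hmod, hfd, Int.toNat_natCast]
      rw [if_pos (by norm_num)]
      rw [pvContrib_eq d m0 (hb m0 List.mem_cons_self).1 (hb m0 List.mem_cons_self).2 0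
        (by norm_num) _ hmod]
      rw [PySem.List.pyGetD_natCast, List.set_append, if_neg (by omega : ¬ j < done.length)]
      rw [List.getD_append_right _ _ _ _ (by omega)]
      simp [hdone]
    rw [hhead]
    have hoff : 8 * j + 1 = 8 * j + (1 : Nat) := rfl
    rw [pvInner d c' 1 le_rfl (by simp at hlen ⊢; omega)
      (fun x hx => hb x (List.mem_cons_of_mem _ hx)) j done
      (PySem.Int.bor 0 (pvSel d m0 <<< (7 : Nat))) hdone]
    rw [List.map_cons, pvEnumCons, List.foldl_cons]
    norm_num
    rfl

theorem pvMain (d : List Int) (N : Nat) :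
    ∀ (ms : List Int), ms.length ≤ N →
    (∀ m ∈ ms, -(8 * (d.length : Int)) ≤ m - 1 ∧ m - 1 < 8 * (d.length : Int)) →
    ∀ (j : Nat) (done : List Int), done.length = j →
    (ms.zipIdx (8 * j)).foldl (fun k p => pvStep d k p.1 (p.2 : Int)) done =
      done ++ pvPackB (ms.map (pvSel d)) := by
  induction N with
  | zero =>
    intro ms hlen _ j done _
    have hnil : ms = [] := by cases ms <;> simp_all
    subst hnil
    simp [pvPackB]
  | succ N ih =>
    intro ms hlen hbnd j done hdone
    cases ms with
    | nil => simp [pvPackB]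
    | cons m0 ms' =>
      have hsplit : m0 :: ms' = (m0 :: ms').take 8 ++ (m0 :: ms').drop 8 :=
        (List.take_append_drop 8 _).symm
      conv_lhs => rw [hsplit]
      rw [List.zipIdx_append, List.foldl_append]
      have htk_ne : (m0 :: ms').take 8 ≠ [] := by simp
      have htk_le : ((m0 :: ms').take 8).length ≤ 8 := by simp
      rw [pvChunk d _ htk_ne htk_le (fun x hx => hbnd x (List.mem_of_mem_take hx)) j done hdone]
      have hmt : (pvSel d m0 :: List.map (pvSel d) ms').take 8 =
          List.map (pvSel d) ((m0 :: ms').take 8) := by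
        rw [← List.map_cons, List.map_take]
      have hmd : (pvSel d m0 :: List.map (pvSel d) ms').drop 8 =
          List.map (pvSel d) ((m0 :: ms').drop 8) := by
        rw [← List.map_cons, List.map_drop]
      by_cases h8 : (m0 :: ms').length ≤ 8
      · have hdrop : (m0 :: ms').drop 8 = [] := List.drop_eq_nil_of_le h8
        rw [hdrop]
        simp only [List.zipIdx_nil, List.foldl_nil]
        rw [List.map_cons, pvPackB, hmt, hmd, hdrop]
        simp [pvPackB]
      · have hlen8 : ((m0 :: ms').take 8).length = 8 := by
          simp at h8 ⊢; omega
        rw [hlen8]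
        have hoff : 8 * j + 8 = 8 * (j + 1) := by ring
        rw [hoff]
        rw [ih ((m0 :: ms').drop 8) (by simp at hlen h8 ⊢; omega)
          (fun x hx => hbnd x (List.mem_of_mem_drop hx)) (j + 1) _ (by simp [hdone])]
        rw [List.map_cons, pvPackB, hmt, hmd]
        simp

-- ===== VERDICT (by name: the statement is the Claim_ definition above) =====
theorem hoanvi_spec : Claim_equal_hoanvi := by
  intro dauvao matran _ hpre
  unfold Spec_hoanvi
  rw [pvL1]
  have h := pvMain dauvao matran.length matran le_rfl hpre 0 [] rfl
  simp only [Nat.mul_zero, List.nil_append] at h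
  rw [h]
  rfl
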